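-- pv_equiv track=rewrite | github.com/wasd314/consecutive-power-sum | more/e23_only_div_py/main.py | re0_two_pointer
-- ===== SOURCE A (Python) =====
-- def re0_two_pointer(n: int, e: int):
--     pows = []
--     for i in range(n + 1):
--         if i**e <= n:
--             pows.append(i**e)
--         else:
--             break
--     # pows[i] = i**e
--
--     c = len(pows)
--     ans = []
--     r = 1
--     current_sum = 0
--     for l in range(1, c):
--         while r < c and current_sum + pows[r] <= n:
--             current_sum += pows[r]
--             r += 1
--         # (r >= c or) current_sum <= n < current_sum + pows[r]
--         if current_sum == n:
--             ans.append((e, l, r - 1))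
--         if l < r:
--             current_sum -= pows[l]
--     ans.sort()
--     return ans
-- ===== SOURCE B (Python) =====
-- def _bsearch(prefix, lo, hi, target):
--     # least index r in [lo, hi] with prefix[r] >= target (bisect_left)
--     while lo < hi:
--         mid = (lo + hi) // 2
--         if prefix[mid] < target:
--             lo = mid + 1
--         else:
--             hi = mid
--     return lo
--
--
-- def re0_two_pointer(n: int, e: int):
--     # prefix[j] = sum of the first j e-th powers that stay <= n
--     prefix = [0]
--     for i in range(n + 1):
--         p = i**e
--         if p <= n:
--             prefix.append(prefix[-1] + p)
--         else:
--             break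
--     c = len(prefix) - 1
--     ans = []
--     for l in range(1, c):
--         target = prefix[l] + n
--         r = _bsearch(prefix, l + 1, c + 1, target)
--         if r <= c and prefix[r] == target:
--             ans.append((e, l, r - 1))
--     return ans
-- ===== Notes on version B (the rewrite author's own statement) =====
-- stated objective: alternative
-- what changed: Replaces A's two-pointer sliding-window scan (carrying a running window sum and right pointer across left endpoints) with a prefix-sum table built directly and a hand-written binary search (bisect_left) locating the run end for each left endpoint.
import Mathlib
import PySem

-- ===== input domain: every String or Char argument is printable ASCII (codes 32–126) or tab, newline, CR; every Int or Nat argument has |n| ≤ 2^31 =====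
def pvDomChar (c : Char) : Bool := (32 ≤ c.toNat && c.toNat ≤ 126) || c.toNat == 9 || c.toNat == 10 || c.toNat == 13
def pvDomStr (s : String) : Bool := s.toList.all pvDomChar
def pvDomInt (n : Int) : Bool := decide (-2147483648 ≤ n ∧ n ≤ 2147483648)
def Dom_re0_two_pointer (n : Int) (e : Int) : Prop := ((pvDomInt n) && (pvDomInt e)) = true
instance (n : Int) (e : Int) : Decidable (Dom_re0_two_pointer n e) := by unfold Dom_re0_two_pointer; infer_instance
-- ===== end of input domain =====

-- B replaces A's two-pointer sliding window by a prefix-sum table queried with a hand-written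
-- binary search (bisect_left) for each left endpoint; same return value, alternative algorithm.

-- ===== PORT A =====
-- Python list indexing a[i] for arrays (O(1), like Python's list); negative i from the end,
-- exact for -size ≤ i < size (the only indices the ports reach)
def pvArrGet (a : Array Int) (i : Int) : Int :=
  if 0 ≤ i then a.getD i.toNat 0 else a.getD (a.size - (-i).toNat) 0

-- Python's tuple '<' on (Int, Int, Int), used by ans.sort()
def pvLexLt (a b : Int × Int × Int) : Bool :=
  a.1 < b.1 || (a.1 == b.1 && (a.2.1 < b.2.1 || (a.2.1 == b.2.1 && a.2.2 < b.2.2)))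

-- ans.sort(): Python's stable sort (insertion sort form, cf. PySem.List.sorted_eq_foldl_insertBy)
def pvSortA (xs : List (Int × Int × Int)) : List (Int × Int × Int) :=
  xs.foldl (fun acc x => PySem.List.insertBy pvLexLt x acc) []

-- the pows-building 'for i in range(n+1)' loop with break, iterating the (lazy) range by
-- index; i**e on the admitted e ≥ 0 is i ^ e.toNat
def pvPowsA (n e : Int) (i : Int) (pows : Array Int) : Array Int :=
  if h : i < n + 1 then
    if i ^ e.toNat ≤ n then pvPowsA n e (i + 1) (pows.push (i ^ e.toNat)) else pows
  else pows
termination_by (n + 1 - i).toNat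
decreasing_by omega

-- the inner 'while r < c and current_sum + pows[r] <= n' loop
def pvAdvA (pows : Array Int) (n c : Int) (r s : Int) : Int × Int :=
  if h : r < c ∧ s + pvArrGet pows r ≤ n then
    pvAdvA pows n c (r + 1) (s + pvArrGet pows r)
  else (r, s)
termination_by (c - r).toNat
decreasing_by obtain ⟨h1, -⟩ := h; omega

-- the 'for l in range(1, c)' loop, state (r, current_sum, ans)
def pvLoopA (pows : Array Int) (n e c : Int) :
    List Int → Int × Int × List (Int × Int × Int) → Int × Int × List (Int × Int × Int)
  | [], st => st
  | l :: ls, (r, s, ans) =>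
    let rs := pvAdvA pows n c r s
    let ans' := if rs.2 = n then ans ++ [(e, l, rs.1 - 1)] else ans
    let s' := if l < rs.1 then rs.2 - pvArrGet pows l else rs.2
    pvLoopA pows n e c ls (rs.1, s', ans')

def re0_two_pointer (n : Int) (e : Int) : List (Int × Int × Int) :=
  let pows := pvPowsA n e 0 #[]
  let c : Int := pows.size
  let st := pvLoopA pows n e c (PySem.List.pyRange 1 c 1) (1, 0, [])
  pvSortA st.2.2

-- ===== PORT B =====
-- the prefix-building loop over the (lazy) range, by index; prefix[-1] is the last element
def pvPrefixB (n e : Int) (i : Int) (pref : Array Int) : Array Int :=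
  if h : i < n + 1 then
    if i ^ e.toNat ≤ n then
      pvPrefixB n e (i + 1) (pref.push (pvArrGet pref (-1) + i ^ e.toNat))
    else pref
  else pref
termination_by (n + 1 - i).toNat
decreasing_by omega

-- hand-written bisect_left: least index in [lo, hi] whose prefix value is ≥ target
def pvBsearchB (pref : Array Int) (lo hi t : Int) : Int :=
  if h : lo < hi then
    let mid := PySem.Int.floordiv (lo + hi) 2
    if pvArrGet pref mid < t then pvBsearchB pref (mid + 1) hi t
    else pvBsearchB pref lo mid t
  else lo
termination_by (hi - lo).toNat
decreasing_by
  · have := PySem.Int.floordiv_two_mid_bounds (le_of_lt h); omega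
  · have h2 : PySem.Int.floordiv (lo + hi) 2 < hi := by
      have := PySem.Int.floordiv_two_mid_bounds (le_of_lt h)
      have h3 : PySem.Int.floordiv (lo + hi) 2 ≠ hi := by
        intro hEq
        have := PySem.Int.floordiv_mul_add_mod (lo + hi) 2
        have := PySem.Int.mod_two_eq (lo + hi)
        omega
      omega
    omega

-- the 'for l in range(1, c)' loop of B
def pvLoopB (pref : Array Int) (n e c : Int) :
    List Int → List (Int × Int × Int) → List (Int × Int × Int)
  | [], ans => ans
  | l :: ls, ans =>
    let t := pvArrGet pref l + n
    let r := pvBsearchB pref (l + 1) (c + 1) t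
    let ans' := if r ≤ c ∧ pvArrGet pref r = t then ans ++ [(e, l, r - 1)] else ans
    pvLoopB pref n e c ls ans'

def re0_two_pointer_alt (n : Int) (e : Int) : List (Int × Int × Int) :=
  let pref := pvPrefixB n e 0 #[0]
  let c : Int := (pref.size : Int) - 1
  pvLoopB pref n e c (PySem.List.pyRange 1 c 1) []

-- ===== PRECONDITION & SPEC =====
-- Pre_ excludes exactly the inputs where Python A raises: for e < 0 and n ≥ 0 the first loop
-- iteration evaluates 0**e and raises ZeroDivisionError. A is total everywhere else.
def Pre_re0_two_pointer (n : Int) (e : Int) : Prop := 0 ≤ e ∨ n < 0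
instance (n : Int) (e : Int) : Decidable (Pre_re0_two_pointer n e) := by
  unfold Pre_re0_two_pointer; infer_instance

def pvWitness_re0_two_pointer : Int × Int := (30, 2)

def Spec_re0_two_pointer (n : Int) (e : Int) (out : List (Int × Int × Int)) : Prop := out = re0_two_pointer_alt n e
instance (n : Int) (e : Int) (out : List (Int × Int × Int)) : Decidable (Spec_re0_two_pointer n e out) := by unfold Spec_re0_two_pointer; infer_instance

-- ===== CLAIM (what is proved, stated in full; the proofs are below) =====
def Claim_equal_re0_two_pointer : Prop := ∀ (n : Int) (e : Int), Dom_re0_two_pointer n e → Pre_re0_two_pointer n e → Spec_re0_two_pointer n e (re0_two_pointer n e)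

-- ===== LEMMAS AND PROOFS =====

-- proof-side abbreviations
def pvPowsArr (n e : Int) : Array Int := pvPowsA n e 0 #[]
def pvPows (n e : Int) : List Int := (pvPowsArr n e).toList
def pvK (n e : Int) : Nat := (pvPows n e).length
def pvS (n e : Int) (j : Nat) : Int := ((pvPows n e).take j).sum
def pvPrefArr (n e : Int) : Array Int := pvPrefixB n e 0 #[0]
def pvPref (n e : Int) : List Int := (pvPrefArr n e).toList

lemma pvArrGet_eq (a : Array Int) (j : Nat) (h : j < a.size) :
    pvArrGet a (j : Int) = a.toList.getD j 0 := by
  have h' : j < a.toList.length := by simpa using h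
  unfold pvArrGet
  rw [if_pos (Int.natCast_nonneg j), List.getD_eq_getElem _ _ h']
  simp [Array.getD, h, Int.toNat_natCast, ← Array.getElem_toList]

lemma pvArrGet_push_last (a : Array Int) (x : Int) : pvArrGet (a.push x) (-1) = x := by
  unfold pvArrGet
  rw [if_neg (by omega)]
  simp [Array.getD]

lemma pvRange_nil (a b : Int) (h : b ≤ a) : PySem.List.pyRange a b 1 = [] := by
  rw [PySem.List.pyRange_one]
  have h0 : (b - a).toNat = 0 := by omega
  rw [h0]
  simp

def pvScan : Int → List Int → List Int
  | _, [] => []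
  | s, p :: ps => (s + p) :: pvScan (s + p) ps

lemma pvPowsA_eq (n e : Int) : ∀ (fuel : Nat) (i : Int) (acc : Array Int),
    (n + 1 - i).toNat ≤ fuel →
    (pvPowsA n e i acc).toList
      = acc.toList ++ ((PySem.List.pyRange i (n + 1) 1).takeWhile
          (fun x => x ^ e.toNat ≤ n)).map (fun x => x ^ e.toNat) := by
  intro fuel
  induction fuel with
  | zero =>
    intro i acc hf
    rw [pvPowsA, dif_neg (by omega : ¬ i < n + 1), pvRange_nil _ _ (by omega)]
    simp
  | succ fuel ih =>
    intro i acc hf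
    by_cases hi : i < n + 1
    · rw [pvPowsA, dif_pos hi, PySem.List.pyRange_one_cons hi]
      by_cases hp : i ^ e.toNat ≤ n
      · rw [if_pos hp, ih (i + 1) _ (by omega)]
        simp [hp, Array.toList_push]
      · rw [if_neg hp]
        simp [hp]
    · rw [pvPowsA, dif_neg hi, pvRange_nil _ _ (by omega)]
      simp

lemma pvPows_eq (n e : Int) :
    pvPows n e = ((List.range (n + 1).toNat).takeWhile (fun k : Nat => ((k : Int)) ^ e.toNat ≤ n)).map
      (fun k : Nat => ((k : Int)) ^ e.toNat) := by
  unfold pvPows pvPowsArr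
  rw [pvPowsA_eq n e (n + 1).toNat 0 #[] (by omega), PySem.List.pyRange_one,
    List.takeWhile_map, List.map_map]
  simp only [Array.toList_empty, List.nil_append, Function.comp_def, zero_add, sub_zero]

lemma pvPows_getElem (n e : Int) (j : Nat) (h : j < pvK n e) :
    (pvPows n e)[j]'h = (j : Int) ^ e.toNat := by
  rw [List.getElem_of_eq (pvPows_eq n e) h, List.getElem_map,
    (List.takeWhile_prefix _).getElem, List.getElem_range]

lemma pvPows_le (n e : Int) : ∀ x ∈ pvPows n e, x ≤ n := by
  intro x hx
  rw [pvPows_eq] at hx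
  simp only [List.mem_map] at hx
  obtain ⟨k, hk, rfl⟩ := hx
  simpa using List.mem_takeWhile_imp hk

lemma pvPows_pos (n e : Int) (j : Nat) (h1 : 1 ≤ j) (h : j < pvK n e) :
    1 ≤ (pvPows n e)[j]'h := by
  rw [pvPows_getElem n e j h]
  have h2 : (1 : Int) ≤ (j : Int) := by exact_mod_cast h1
  exact one_le_pow₀ h2

lemma pvN_pos (n e : Int) (h : 2 ≤ pvK n e) : 1 ≤ n := by
  have hlen : 2 ≤ (pvPows n e).length := by unfold pvK at h; exact h
  have hg : (pvPows n e)[1]'(by omega) = (1 : Int) ^ e.toNat := pvPows_getElem n e 1 (by omega)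
  have hle : (pvPows n e)[1]'(by omega) ≤ n := pvPows_le n e _ (List.getElem_mem _)
  rw [hg, one_pow] at hle
  exact hle

lemma pvS_succ (n e : Int) (j : Nat) (h : j < pvK n e) :
    pvS n e (j + 1) = pvS n e j + (pvPows n e)[j]'h := by
  unfold pvS
  have h' : j < (pvPows n e).length := by unfold pvK at h; exact h
  rw [List.take_add_one, List.getElem?_eq_getElem h', List.sum_append]
  simp
  rfl

lemma pvPows_nonneg (n e : Int) (j : Nat) (h : j < pvK n e) : 0 ≤ (pvPows n e)[j]'h := by
  rw [pvPows_getElem n e j h]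
  positivity

lemma pvS_mono (n e : Int) (i j : Nat) (hij : i ≤ j) (hj : j ≤ pvK n e) :
    pvS n e i ≤ pvS n e j := by
  induction j with
  | zero =>
    have h0 : i = 0 := by omega
    subst h0; exact le_refl _
  | succ j ih =>
    rcases Nat.lt_or_ge i (j + 1) with hlt | hge
    · have hjk : j < pvK n e := by omega
      have hstep := pvS_succ n e j hjk
      have hnn := pvPows_nonneg n e j hjk
      have hih := ih (by omega) (by omega)
      omega
    · have h0 : i = j + 1 := by omega
      subst h0; exact le_refl _

lemma pvS_strict (n e : Int) (i j : Nat) (hi : 1 ≤ i) (hij : i < j) (hj : j ≤ pvK n e) :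
    pvS n e i < pvS n e j := by
  have hik : i < pvK n e := by omega
  have h1 := pvS_succ n e i hik
  have h2 := pvPows_pos n e i hi hik
  have h3 := pvS_mono n e (i + 1) j (by omega) hj
  omega

lemma pvPrefixB_eq (n e : Int) : ∀ (fuel : Nat) (i : Int) (acc : Array Int) (s : Int),
    (n + 1 - i).toNat ≤ fuel → 0 < acc.size → pvArrGet acc (-1) = s →
    (pvPrefixB n e i acc).toList
      = acc.toList ++ pvScan s (((PySem.List.pyRange i (n + 1) 1).takeWhile
          (fun x => x ^ e.toNat ≤ n)).map (fun x => x ^ e.toNat)) := by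
  intro fuel
  induction fuel with
  | zero =>
    intro i acc s hf hsz hlast
    rw [pvPrefixB, dif_neg (by omega : ¬ i < n + 1), pvRange_nil _ _ (by omega)]
    simp [pvScan]
  | succ fuel ih =>
    intro i acc s hf hsz hlast
    by_cases hi : i < n + 1
    · rw [pvPrefixB, dif_pos hi, PySem.List.pyRange_one_cons hi]
      by_cases hp : i ^ e.toNat ≤ n
      · rw [if_pos hp, hlast,
          ih (i + 1) (acc.push (s + i ^ e.toNat)) (s + i ^ e.toNat) (by omega)
            (by simp) (pvArrGet_push_last _ _)]
        simp [hp, Array.toList_push, pvScan]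
      · rw [if_neg hp]
        simp [hp, pvScan]
    · rw [pvPrefixB, dif_neg hi, pvRange_nil _ _ (by omega)]
      simp [pvScan]

lemma pvPref_eq (n e : Int) : pvPref n e = 0 :: pvScan 0 (pvPows n e) := by
  unfold pvPref pvPrefArr
  rw [pvPrefixB_eq n e (n + 1).toNat 0 #[0] 0 (by omega) (by simp) (by rfl)]
  have hp : pvPows n e
      = ((PySem.List.pyRange 0 (n + 1) 1).takeWhile (fun x => x ^ e.toNat ≤ n)).map
          (fun x => x ^ e.toNat) := by
    unfold pvPows pvPowsArr
    rw [pvPowsA_eq n e (n + 1).toNat 0 #[] (by omega)]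
    simp
  rw [← hp]
  rfl

lemma pvScan_length (s : Int) (xs : List Int) : (pvScan s xs).length = xs.length := by
  induction xs generalizing s with
  | nil => simp [pvScan]
  | cons p ps ih => simp [pvScan, ih]

lemma pvScan_getElem (xs : List Int) : ∀ (s : Int) (j : Nat) (h : j < xs.length),
    (pvScan s xs)[j]'(by rw [pvScan_length]; exact h) = s + (xs.take (j + 1)).sum := by
  induction xs with
  | nil => intro s j h; simp at h
  | cons p ps ih =>
    intro s j h
    cases j with
    | zero => simp [pvScan]
    | succ j' =>
      have h' : j' < ps.length := by simpa using h
      simp only [pvScan, List.getElem_cons_succ, List.take_succ_cons, List.sum_cons]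
      rw [ih (s + p) j' h']
      ring

lemma pvPref_length (n e : Int) : (pvPref n e).length = pvK n e + 1 := by
  rw [pvPref_eq]
  simp only [List.length_cons, pvScan_length]
  rfl

lemma pvPref_getD (n e : Int) (j : Nat) (h : j ≤ pvK n e) :
    (pvPref n e).getD j 0 = pvS n e j := by
  rw [pvPref_eq]
  cases j with
  | zero => simp [pvS]
  | succ j' =>
    have hj' : j' < (pvPows n e).length := by unfold pvK at h; omega
    rw [List.getD_cons_succ, List.getD_eq_getElem _ _ (by rw [pvScan_length]; exact hj'),
      pvScan_getElem (pvPows n e) 0 j' hj']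
    simp [pvS]

lemma pvPref_get (n e : Int) (j : Nat) (h : j ≤ pvK n e) :
    pvArrGet (pvPrefArr n e) (j : Int) = pvS n e j := by
  have hlen : (pvPref n e).length = pvK n e + 1 := pvPref_length n e
  have hsz : j < (pvPrefArr n e).size := by
    rw [← Array.length_toList]
    exact lt_of_le_of_lt h (by unfold pvPref at hlen; omega)
  rw [pvArrGet_eq _ j hsz]
  exact pvPref_getD n e j h

lemma pvAdv_spec (n e : Int) : ∀ (fuel r : Nat), pvK n e - r ≤ fuel → r ≤ pvK n e → ∀ (s : Int),
    ∃ r' : Nat, r ≤ r' ∧ r' ≤ pvK n e ∧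
      pvAdvA (pvPowsArr n e) n (pvK n e) (r : Int) s = ((r' : Int), s + (pvS n e r' - pvS n e r)) ∧
      (r' = pvK n e ∨ ¬ (s + (pvS n e (r' + 1) - pvS n e r) ≤ n)) ∧
      (r' = r ∨ s + (pvS n e r' - pvS n e r) ≤ n) := by
  intro fuel
  induction fuel with
  | zero =>
    intro r hf hr s
    have hrk : r = pvK n e := by omega
    have hng : ¬ ((r : Int) < ((pvK n e : Nat) : Int)
        ∧ s + pvArrGet (pvPowsArr n e) (r : Int) ≤ n) := by
      intro hc
      obtain ⟨hc1, -⟩ := hc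
      have : r < pvK n e := by exact_mod_cast hc1
      omega
    refine ⟨r, le_refl _, hr, ?_, Or.inl hrk, Or.inl rfl⟩
    rw [pvAdvA, dif_neg hng]
    simp
  | succ fuel ih =>
    intro r hf hr s
    by_cases hg : ((r : Int) < ((pvK n e : Nat) : Int)
        ∧ s + pvArrGet (pvPowsArr n e) (r : Int) ≤ n)
    · obtain ⟨hg1, hg2⟩ := hg
      have hrk : r < pvK n e := by exact_mod_cast hg1
      have hrk' : r < (pvPows n e).length := by unfold pvK at hrk; exact hrk
      have hget : pvArrGet (pvPowsArr n e) (r : Int) = (pvPows n e)[r]'hrk' := by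
        rw [pvArrGet_eq _ r hrk']
        exact List.getD_eq_getElem _ _ hrk'
      rw [hget] at hg2
      obtain ⟨r', h1, h2, h3, h4, h5⟩ := ih (r + 1) (by omega) (by omega) (s + (pvPows n e)[r]'hrk')
      have hstep := pvS_succ n e r hrk
      refine ⟨r', by omega, h2, ?_, ?_, ?_⟩
      · rw [pvAdvA, dif_pos ⟨hg1, by rw [hget]; exact hg2⟩, hget]
        have hcast : ((r : Int) + 1) = ((r + 1 : Nat) : Int) := by push_cast; ring
        rw [hcast, h3]
        simp only [Prod.mk.injEq]
        exact ⟨trivial, by omega⟩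
      · rcases h4 with h4 | h4
        · exact Or.inl h4
        · right; omega
      · right
        rcases h5 with h5 | h5
        · subst h5; omega
        · omega
    · have hng := hg
      refine ⟨r, le_refl _, hr, ?_, ?_, Or.inl rfl⟩
      · rw [pvAdvA, dif_neg hng]
        simp
      · by_cases hrk : r < pvK n e
        · right
          have hrk' : r < (pvPows n e).length := by unfold pvK at hrk; exact hrk
          have hget : pvArrGet (pvPowsArr n e) (r : Int) = (pvPows n e)[r]'hrk' := by
            rw [pvArrGet_eq _ r hrk']
            exact List.getD_eq_getElem _ _ hrk'
          have hB : ¬ (s + pvArrGet (pvPowsArr n e) (r : Int) ≤ n) := by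
            intro hc
            exact hng ⟨by exact_mod_cast hrk, hc⟩
          rw [hget] at hB
          have hstep := pvS_succ n e r hrk
          omega
        · exact Or.inl (by omega)

lemma pvBsearch_spec (n e : Int) (t : Int) : ∀ (fuel lo hi : Nat), hi - lo ≤ fuel → lo ≤ hi →
    hi ≤ pvK n e + 1 →
    ∃ rb : Nat, pvBsearchB (pvPrefArr n e) (lo : Int) (hi : Int) t = (rb : Int) ∧ lo ≤ rb ∧ rb ≤ hi ∧
      (∀ j, lo ≤ j → j < rb → pvS n e j < t) ∧ (rb < hi → t ≤ pvS n e rb) := by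
  intro fuel
  induction fuel with
  | zero =>
    intro lo hi hf hlh hhk
    have h0 : lo = hi := by omega
    subst h0
    refine ⟨lo, ?_, le_refl _, le_refl _, fun j h1 h2 => absurd h2 (by omega),
      fun h => absurd h (by omega)⟩
    rw [pvBsearchB, dif_neg (by omega : ¬ ((lo : Int) < (lo : Int)))]
  | succ fuel ih =>
    intro lo hi hf hlh hhk
    by_cases hlt : lo < hi
    case neg =>
      have h0 : lo = hi := by omega
      subst h0
      refine ⟨lo, ?_, le_refl _, le_refl _, fun j h1 h2 => absurd h2 (by omega),
        fun h => absurd h (by omega)⟩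
      rw [pvBsearchB, dif_neg (by omega : ¬ ((lo : Int) < (lo : Int)))]
    case pos =>
      have hlt' : (lo : Int) < (hi : Int) := by exact_mod_cast hlt
      have hm : PySem.Int.floordiv ((lo : Int) + (hi : Int)) 2 = (((lo + hi) / 2 : Nat) : Int) := by
        exact_mod_cast PySem.Int.floordiv_natCast (lo + hi) 2
      set mid := (lo + hi) / 2 with hmid
      have hm1 : lo ≤ mid := by omega
      have hm2 : mid < hi := by omega
      have hmk : mid ≤ pvK n e := by omega
      have hget : pvArrGet (pvPrefArr n e) ((mid : Nat) : Int) = pvS n e mid :=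
        pvPref_get n e mid hmk
      have hunf : pvBsearchB (pvPrefArr n e) (lo : Int) (hi : Int) t
          = if pvArrGet (pvPrefArr n e) ((mid : Nat) : Int) < t then
              pvBsearchB (pvPrefArr n e) ((mid + 1 : Nat) : Int) (hi : Int) t
            else pvBsearchB (pvPrefArr n e) (lo : Int) ((mid : Nat) : Int) t := by
        rw [pvBsearchB, dif_pos hlt']
        simp only [hm, Nat.cast_add, Nat.cast_one]
      by_cases hcmp : pvArrGet (pvPrefArr n e) ((mid : Nat) : Int) < t
      · rw [hget] at hcmp
        obtain ⟨rb, heq, h2, h3, h4, h5⟩ := ih (mid + 1) hi (by omega) (by omega) hhk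
        refine ⟨rb, ?_, by omega, h3, ?_, h5⟩
        · rw [hunf, if_pos (by rw [hget]; exact hcmp)]
          exact heq
        · intro j hj1 hj2
          rcases Nat.lt_or_ge j (mid + 1) with hj | hj
          · exact lt_of_le_of_lt (pvS_mono n e j mid (by omega) hmk) hcmp
          · exact h4 j hj hj2
      · rw [hget] at hcmp
        obtain ⟨rb, heq, h2, h3, h4, h5⟩ := ih lo mid (by omega) hm1 (by omega)
        refine ⟨rb, ?_, h2, by omega, h4, ?_⟩
        · rw [hunf, if_neg (by rw [hget]; exact hcmp)]
          exact heq
        · intro hrb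
          rcases Nat.lt_or_ge rb mid with hj | hj
          · exact h5 hj
          · have h0 : rb = mid := by omega
            subst h0
            exact le_of_not_gt hcmp

lemma pvLoop_eq (n e : Int) : ∀ (fuel l r : Nat) (s : Int) (ans : List (Int × Int × Int)),
    pvK n e - l ≤ fuel → 1 ≤ l → l ≤ r → r ≤ pvK n e →
    s = pvS n e r - pvS n e l → s ≤ n →
    (pvLoopA (pvPowsArr n e) n e (pvK n e) (PySem.List.pyRange (l : Int) ((pvK n e : Nat) : Int) 1)
        ((r : Int), s, ans)).2.2
      = pvLoopB (pvPrefArr n e) n e (pvK n e)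
          (PySem.List.pyRange (l : Int) ((pvK n e : Nat) : Int) 1) ans := by
  intro fuel
  induction fuel with
  | zero =>
    intro l r s ans hf h1 hlr hrk hs hsn
    rw [pvRange_nil _ _ (by exact_mod_cast (by omega : pvK n e ≤ l))]
    simp [pvLoopA, pvLoopB]
  | succ fuel ih =>
    intro l r s ans hf h1 hlr hrk hs hsn
    by_cases hlk : l < pvK n e
    case neg =>
      rw [pvRange_nil _ _ (by exact_mod_cast (by omega : pvK n e ≤ l))]
      simp [pvLoopA, pvLoopB]
    case pos =>
      have hn1 : 1 ≤ n := pvN_pos n e (by omega)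
      rw [PySem.List.pyRange_one_cons (by exact_mod_cast hlk)]
      obtain ⟨r', ha1, ha2, ha3, ha4, ha5⟩ := pvAdv_spec n e (pvK n e) r (by omega) (by omega) s
      have hlpows : l < (pvPows n e).length := by unfold pvK at hlk; exact hlk
      have hstepl := pvS_succ n e l hlk
      have hplel : (pvPows n e)[l]'hlpows ≤ n := pvPows_le n e _ (List.getElem_mem _)
      have hppos : 1 ≤ (pvPows n e)[l]'hlpows := pvPows_pos n e l h1 hlk
      have hlr' : l < r' := by
        by_contra hc
        have hr'l : r' = l := by omega
        have hrl : r = l := by omega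
        subst hr'l
        subst hrl
        rcases ha4 with h4 | h4
        · omega
        · exact h4 (by omega)
      have hgetl : pvArrGet (pvPowsArr n e) ((l : Nat) : Int) = (pvPows n e)[l]'hlpows := by
        rw [pvArrGet_eq _ l hlpows]
        exact List.getD_eq_getElem _ _ hlpows
      have hprefl := pvPref_get n e l (by omega)
      have hs'le : pvS n e r' - pvS n e l ≤ n := by
        rcases ha5 with h5 | h5
        · subst h5
          omega
        · omega
      obtain ⟨rb, hb1, hb2, hb3, hb4, hb5⟩ :=
        pvBsearch_spec n e (pvS n e l + n) (pvK n e + 1) (l + 1) (pvK n e + 1)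
          (by omega) (by omega) (le_refl _)
      have hcast1 : ((l : Int) + 1) = ((l + 1 : Nat) : Int) := by push_cast; ring
      have hcast2 : (((pvK n e : Nat) : Int) + 1) = ((pvK n e + 1 : Nat) : Int) := by
        push_cast; ring
      simp only [pvLoopA, pvLoopB, ha3, hcast1, hcast2, hb1, hprefl, hgetl]
      by_cases hA : pvS n e r' - pvS n e l = n
      · have hrbeq : rb = r' := by
          by_contra hne
          rcases Nat.lt_or_ge rb r' with hlt2 | hge2
          · have h51 := hb5 (by omega)
            have h52 : pvS n e rb < pvS n e r' := pvS_strict n e rb r' (by omega) hlt2 ha2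
            omega
          · have h31 := hb4 r' (by omega) (by omega)
            omega
        subst hrbeq
        have hgB2 : ((rb : Nat) : Int) ≤ ((pvK n e : Nat) : Int)
            ∧ pvArrGet (pvPrefArr n e) ((rb : Nat) : Int) = pvS n e l + n := by
          refine ⟨by exact_mod_cast ha2, ?_⟩
          rw [pvPref_get n e rb ha2]
          omega
        rw [if_pos (by omega : s + (pvS n e rb - pvS n e r) = n)]
        rw [if_pos (show (l : Int) < (rb : Int) by exact_mod_cast hlr')]
        rw [if_pos hgB2]
        exact ih (l + 1) rb _ _ (by omega) (by omega) (by omega) ha2 (by omega) (by omega)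
      · have hgB : ¬ (((rb : Nat) : Int) ≤ ((pvK n e : Nat) : Int)
            ∧ pvArrGet (pvPrefArr n e) ((rb : Nat) : Int) = pvS n e l + n) := by
          rintro ⟨hc1, hc2⟩
          have hrbk : rb ≤ pvK n e := by exact_mod_cast hc1
          rw [pvPref_get n e rb hrbk] at hc2
          have hr'rb : r' = rb := by
            by_contra hne
            rcases Nat.lt_or_ge r' rb with hlt2 | hge2
            · rcases ha4 with h4 | h4
              · omega
              · have hm2 : pvS n e (r' + 1) ≤ pvS n e rb :=
                  pvS_mono n e (r' + 1) rb (by omega) hrbk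
                omega
            · have h52 : pvS n e rb < pvS n e r' :=
                pvS_strict n e rb r' (by omega) (by omega) ha2
              omega
          subst hr'rb
          omega
        rw [if_neg (by omega : ¬ (s + (pvS n e r' - pvS n e r) = n))]
        rw [if_pos (show (l : Int) < (r' : Int) by exact_mod_cast hlr')]
        rw [if_neg hgB]
        exact ih (l + 1) r' _ _ (by omega) (by omega) (by omega) ha2 (by omega) (by omega)

lemma pvLoopB_append (pref : Array Int) (n e c : Int) :
    ∀ (ls : List Int) (ans : List (Int × Int × Int)),
      pvLoopB pref n e c ls ans = ans ++ pvLoopB pref n e c ls [] := by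
  intro ls
  induction ls with
  | nil => intro ans; simp [pvLoopB]
  | cons l ls ih =>
    intro ans
    simp only [pvLoopB]
    split_ifs with hg
    · rw [ih (ans ++ _), ih ([] ++ _)]
      simp
    · exact ih ans

lemma pvLoopB_shape (pref : Array Int) (n e c : Int) :
    ∀ (ls : List Int), ∀ x ∈ pvLoopB pref n e c ls [], x.1 = e ∧ x.2.1 ∈ ls := by
  intro ls
  induction ls with
  | nil => intro x hx; simp [pvLoopB] at hx
  | cons l ls ih =>
    intro x hx
    simp only [pvLoopB] at hx
    rw [pvLoopB_append] at hx
    split_ifs at hx with hg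
    · simp only [List.nil_append, List.mem_append, List.mem_singleton] at hx
      rcases hx with hx | hx
      · subst hx; simp
      · rcases ih x hx with ⟨h1, h2⟩
        exact ⟨h1, List.mem_cons_of_mem _ h2⟩
    · simp only [List.nil_append] at hx
      rcases ih x hx with ⟨h1, h2⟩
      exact ⟨h1, List.mem_cons_of_mem _ h2⟩

lemma pvLoopB_pairwise (pref : Array Int) (n e c : Int) :
    ∀ (ls : List Int), ls.Pairwise (· < ·) →
      (pvLoopB pref n e c ls []).Pairwise (fun a b => a.2.1 < b.2.1) := by
  intro ls
  induction ls with
  | nil => intro _; simp [pvLoopB]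
  | cons l ls ih =>
    intro hp
    rcases List.pairwise_cons.mp hp with ⟨hhead, htail⟩
    simp only [pvLoopB]
    rw [pvLoopB_append]
    apply List.pairwise_append.mpr
    refine ⟨?_, ih htail, ?_⟩
    · split_ifs with hg <;> simp
    · intro x hx y hy
      have hx1 : x.2.1 = l := by
        split_ifs at hx with hg
        · simp at hx; subst hx; rfl
        · simp at hx
      rcases pvLoopB_shape pref n e c ls y hy with ⟨-, h2⟩
      rw [hx1]
      exact hhead _ h2

lemma pvSortA_id (E : Int) : ∀ (xs acc : List (Int × Int × Int)),
    (∀ x ∈ xs, x.1 = E) → (∀ y ∈ acc, y.1 = E) →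
    (∀ y ∈ acc, ∀ x ∈ xs, y.2.1 < x.2.1) → xs.Pairwise (fun a b => a.2.1 < b.2.1) →
    xs.foldl (fun acc x => PySem.List.insertBy pvLexLt x acc) acc = acc ++ xs := by
  intro xs
  induction xs with
  | nil => intro acc _ _ _ _; simp
  | cons x xs ih =>
    intro acc hxs hacc hcross hp
    rcases List.pairwise_cons.mp hp with ⟨hhead, htail⟩
    simp only [List.foldl_cons]
    rw [PySem.List.insertBy_of_forall_not_before]
    · rw [ih (acc ++ [x])]
      · simp
      · intro z hz; exact hxs z (List.mem_cons_of_mem _ hz)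
      · intro y hy
        rcases List.mem_append.mp hy with hy | hy
        · exact hacc y hy
        · simp at hy; subst hy; exact hxs _ List.mem_cons_self
      · intro y hy z hz
        rcases List.mem_append.mp hy with hy | hy
        · exact hcross y hy z (List.mem_cons_of_mem _ hz)
        · simp at hy; subst hy; exact hhead z hz
      · exact htail
    · intro y hy
      have h1 : y.1 = E := hacc y hy
      have h2 : x.1 = E := hxs x List.mem_cons_self
      have h3 : y.2.1 < x.2.1 := hcross y hy x List.mem_cons_self
      have e1 : ¬ (x.2.1 < y.2.1) := by omega
      have e2 : ¬ (x.2.1 = y.2.1) := by omega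
      simp [pvLexLt, h1, h2, e1, e2]

lemma pvRange_pairwise (a b : Int) : (PySem.List.pyRange a b 1).Pairwise (· < ·) := by
  rw [PySem.List.pyRange_one]
  exact List.Pairwise.map _ (fun k1 k2 h => by omega) List.pairwise_lt_range

-- ===== VERDICT (by name: the statement is the Claim_ definition above) =====
theorem re0_two_pointer_spec : Claim_equal_re0_two_pointer := by
  intro n e hdom hpre
  unfold Spec_re0_two_pointer
  have hA : re0_two_pointer n e
      = pvSortA (pvLoopA (pvPowsArr n e) n e (pvK n e)
          (PySem.List.pyRange 1 ((pvK n e : Nat) : Int) 1) (1, 0, [])).2.2 := rfl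
  have hB : re0_two_pointer_alt n e
      = pvLoopB (pvPrefArr n e) n e (((pvPrefArr n e).size : Int) - 1)
          (PySem.List.pyRange 1 (((pvPrefArr n e).size : Int) - 1) 1) [] := rfl
  have hc : ((pvPrefArr n e).size : Int) - 1 = ((pvK n e : Nat) : Int) := by
    have hs : (pvPrefArr n e).size = pvK n e + 1 := by
      rw [← Array.length_toList]
      exact pvPref_length n e
    rw [hs]; push_cast; ring
  rw [hA, hB, hc]
  by_cases hk : pvK n e < 2
  · have hnil : PySem.List.pyRange 1 ((pvK n e : Nat) : Int) 1 = [] :=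
      pvRange_nil _ _ (by exact_mod_cast (by omega : pvK n e ≤ 1))
    rw [hnil]
    simp [pvLoopA, pvLoopB, pvSortA]
  · have hn1 : 1 ≤ n := pvN_pos n e (by omega)
    have hmain := pvLoop_eq n e (pvK n e) 1 1 0 []
      (by omega) (le_refl _) (le_refl _) (by omega) (by omega) (by omega)
    rw [Nat.cast_one] at hmain
    rw [hmain]
    have hsh := pvLoopB_shape (pvPrefArr n e) n e ((pvK n e : Nat) : Int)
      (PySem.List.pyRange 1 ((pvK n e : Nat) : Int) 1)
    have hpw := pvLoopB_pairwise (pvPrefArr n e) n e ((pvK n e : Nat) : Int)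
      (PySem.List.pyRange 1 ((pvK n e : Nat) : Int) 1) (pvRange_pairwise 1 _)
    unfold pvSortA
    rw [pvSortA_id e _ [] (fun x hx => (hsh x hx).1) (by simp) (by simp) hpw]
    simp
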